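-- pv_equiv track=rewrite | github.com/mhems/decision_tree | Utilities.py | getContiguousPartitions
-- ===== SOURCE A (Python) =====
-- def divyUpNumber(N, K):
--     """Divy up, as evenly as possible, N things to K bins"""
--     bins = [0 for _ in range(K)]
--     while N > 0:
--         for i in range(K):
--             if N > 0:
--                 bins[i] += 1
--             else:
--                 break
--             N -= 1
--     return bins
--
-- def getContiguousPartitions(lines, K):
--     """Return K contiguous partitions of lines"""
--     N = len(lines)
--     bins = divyUpNumber(N, K)
--     partitions = []
--     start = 0
--     for e in bins:
--         partitions.append(lines[start:start+e])
--         start += e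
--     return partitions
-- ===== SOURCE B (Python) =====
-- def getContiguousPartitions(lines, K):
--     """Return K contiguous partitions of lines"""
--     N = len(lines)
--     partitions = []
--     start = 0
--     for i in range(K):
--         size = N // K + (1 if i < N % K else 0)
--         partitions.append(lines[start:start+size])
--         start += size
--     return partitions
-- ===== Notes on version B (the rewrite author's own statement) =====
-- stated objective: simpler
-- what changed: Replaces the round-robin while-loop that builds a bins list by repeated +1 increments (plus a second loop over bins) with a single loop over range(K) that computes each partition size in closed form as N//K + (1 if i < N%K else 0) and slices directly; Pre_ excludes K <= 0 with nonempty lines, where A loops forever (B returns []).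
import Mathlib
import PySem

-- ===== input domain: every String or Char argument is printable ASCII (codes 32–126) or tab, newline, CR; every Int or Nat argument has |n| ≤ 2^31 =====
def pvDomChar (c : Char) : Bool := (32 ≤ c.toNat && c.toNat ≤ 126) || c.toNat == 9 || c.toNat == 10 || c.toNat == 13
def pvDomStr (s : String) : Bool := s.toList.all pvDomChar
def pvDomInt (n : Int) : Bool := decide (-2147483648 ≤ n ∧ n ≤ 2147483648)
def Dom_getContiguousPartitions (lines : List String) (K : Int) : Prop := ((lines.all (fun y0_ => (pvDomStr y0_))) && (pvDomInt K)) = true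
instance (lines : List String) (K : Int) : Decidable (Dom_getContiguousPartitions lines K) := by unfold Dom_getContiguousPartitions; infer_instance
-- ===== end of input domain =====

-- B replaces A's round-robin while-loop distribution (bins built by repeated +1) with one loop over
-- range(K) computing each partition size in closed form — simpler, one loop instead of three.

-- ===== PORT A =====
-- inner 'for i in range(K): if N > 0: bins[i] += 1 else: break; N -= 1'
-- (i is always a valid nonnegative index into bins, so getD/List.set are exact here)
def pvInnerFor : List Int → List Int → Int → List Int × Int
  | [], bins, n => (bins, n)
  | i :: is, bins, n =>
    if n > 0 then pvInnerFor is (bins.set i.toNat (bins.getD i.toNat 0 + 1)) (n - 1)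
    else (bins, n)

-- 'while N > 0: <inner for>' — fueled with N.toNat: whenever K ≥ 1 each pass lowers N by at least 1,
-- so the fuel never runs out before N ≤ 0; for K ≤ 0 and N > 0 Python loops forever (outside Pre_).
def pvWhile : Nat → Int → List Int → Int → List Int
  | 0, _, bins, _ => bins
  | f + 1, n, bins, K =>
    if n > 0 then
      let r := pvInnerFor (PySem.List.pyRange 0 K 1) bins n
      pvWhile f r.2 r.1 K
    else bins

def divyUpNumber (N K : Int) : List Int :=
  pvWhile N.toNat N ((PySem.List.pyRange 0 K 1).map (fun _ => (0 : Int))) K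

def getContiguousPartitions (lines : List String) (K : Int) : List (List String) :=
  ((divyUpNumber (lines.length : Int) K).foldl (fun (acc : List (List String) × Int) e =>
      (acc.1 ++ [PySem.List.slice lines (some acc.2) (some (acc.2 + e))], acc.2 + e))
    (([] : List (List String)), (0 : Int))).1

-- ===== PORT B =====
def getContiguousPartitions_alt (lines : List String) (K : Int) : List (List String) :=
  ((PySem.List.pyRange 0 K 1).foldl (fun (acc : List (List String) × Int) i =>
      let size := PySem.Int.floordiv (lines.length : Int) K +
        (if i < PySem.Int.mod (lines.length : Int) K then 1 else 0)
      (acc.1 ++ [PySem.List.slice lines (some acc.2) (some (acc.2 + size))], acc.2 + size))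
    (([] : List (List String)), (0 : Int))).1

-- ===== PRECONDITION & SPEC =====
-- Pre_ excludes exactly K ≤ 0 with lines ≠ [], where Python A's while loop never terminates
-- (A returns on no such input); it admits every input on which A returns.
def Pre_getContiguousPartitions (lines : List String) (K : Int) : Prop := 0 < K ∨ lines = []
instance (lines : List String) (K : Int) : Decidable (Pre_getContiguousPartitions lines K) := by
  unfold Pre_getContiguousPartitions; infer_instance
def pvWitness_getContiguousPartitions : List String × Int := (["a", "b", "c"], 2)

def Spec_getContiguousPartitions (lines : List String) (K : Int) (out : List (List String)) : Prop := out = getContiguousPartitions_alt lines K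
instance (lines : List String) (K : Int) (out : List (List String)) : Decidable (Spec_getContiguousPartitions lines K out) := by unfold Spec_getContiguousPartitions; infer_instance

-- ===== CLAIM (what is proved, stated in full; the proofs are below) =====
def Claim_equal_getContiguousPartitions : Prop := ∀ (lines : List String) (K : Int), Dom_getContiguousPartitions lines K → Pre_getContiguousPartitions lines K → Spec_getContiguousPartitions lines K (getContiguousPartitions lines K)

-- ===== LEMMAS AND PROOFS =====

-- setting index j of a pyRange-indexed map is pointwise update of the mapped function
lemma pv_set_map_pyRange (K : Int) (f : Int → Int) (j : Int) (hj0 : 0 ≤ j) (v : Int) :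
    ((PySem.List.pyRange 0 K 1).map f).set j.toNat v
      = (PySem.List.pyRange 0 K 1).map (fun i => if i = j then v else f i) := by
  apply List.ext_getElem
  · simp
  · intro k h1 h2
    have hk : (k : Int) < K := by
      have := h1; simp [PySem.List.length_pyRange_one] at this; omega
    simp [List.getElem_set, PySem.List.getElem_pyRange_one]
    split_ifs with h3 h4 h4 <;> first | rfl | (exfalso; omega)

lemma pv_getD_map_pyRange (K : Int) (f : Int → Int) (j : Int) (hj0 : 0 ≤ j) (hjK : j < K) :
    ((PySem.List.pyRange 0 K 1).map f).getD j.toNat 0 = f j := by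
  have hl : j.toNat < ((PySem.List.pyRange 0 K 1).map f).length := by
    simp [PySem.List.length_pyRange_one]; omega
  rw [List.getD_eq_getElem _ _ hl]
  simp [PySem.List.getElem_pyRange_one]
  congr 1; omega

-- one inner pass starting at index j increments the first min(n, K-j) bins from j on and
-- lowers n by that amount
lemma pv_inner_pass (K : Int) : ∀ (d : Nat) (j : Int) (f : Int → Int) (n : Int),
    (K - j).toNat = d → 0 ≤ j → j ≤ K → 0 ≤ n →
    pvInnerFor (PySem.List.pyRange j K 1) ((PySem.List.pyRange 0 K 1).map f) n
      = ((PySem.List.pyRange 0 K 1).map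
          (fun i => f i + if j ≤ i ∧ i < j + min n (K - j) then 1 else 0),
         n - min n (K - j)) := by
  intro d
  induction d with
  | zero =>
    intro j f n hd hj0 hjK hn
    have hjK' : j = K := by omega
    rw [PySem.List.pyRange_one_eq_nil (by omega)]
    simp only [pvInnerFor, Prod.mk.injEq]
    refine ⟨?_, by omega⟩
    apply Eq.symm; apply List.map_congr_left; intro i _hi
    have : ¬ (j ≤ i ∧ i < j + min n (K - j)) := by omega
    simp [this]
  | succ d ih =>
    intro j f n hd hj0 hjK hn
    have hjK' : j < K := by omega
    rw [PySem.List.pyRange_one_cons hjK']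
    by_cases hnp : n > 0
    · simp only [pvInnerFor, if_pos hnp]
      rw [pv_getD_map_pyRange K f j hj0 hjK', pv_set_map_pyRange K f j hj0]
      rw [ih (j+1) _ (n-1) (by omega) (by omega) (by omega) (by omega)]
      rw [Prod.mk.injEq]
      refine ⟨?_, by omega⟩
      · apply List.map_congr_left; intro i hi
        have hi' : 0 ≤ i ∧ i < K := by
          have := (PySem.List.mem_pyRange_one).mp hi; omega
        by_cases hij : i = j
        · subst hij; split_ifs <;> omega
        · simp only [if_neg hij]; split_ifs <;> omega
    · have hn0 : n = 0 := by omega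
      subst hn0
      simp only [pvInnerFor, lt_irrefl, if_false, Prod.mk.injEq]
      refine ⟨?_, by omega⟩
      apply Eq.symm; apply List.map_congr_left; intro i _hi
      have : ¬ (j ≤ i ∧ i < j + min 0 (K - j)) := by omega
      simp [this]

-- the whole while loop distributes n over the K bins: bin i gets n//K, plus 1 if i < n%K
lemma pv_while_rounds (K : Int) (hK : 0 < K) : ∀ (fuel : Nat) (n : Int) (f : Int → Int),
    0 ≤ n → n.toNat ≤ fuel →
    pvWhile fuel n ((PySem.List.pyRange 0 K 1).map f) K
      = (PySem.List.pyRange 0 K 1).map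
          (fun i => f i + (PySem.Int.floordiv n K + if i < PySem.Int.mod n K then 1 else 0)) := by
  intro fuel
  induction fuel with
  | zero =>
    intro n f hn hf
    have hn0 : n = 0 := by omega
    subst hn0
    simp only [pvWhile]
    apply Eq.symm; apply List.map_congr_left; intro i _hi
    rw [PySem.Int.floordiv_eq_ediv_of_pos hK, PySem.Int.mod_eq_emod_of_pos hK]
    simp
    have := (PySem.List.mem_pyRange_one).mp _hi; omega
  | succ fuel ih =>
    intro n f hn hf
    by_cases hnp : n > 0
    · simp only [pvWhile, if_pos hnp]
      rw [pv_inner_pass K (K - 0).toNat 0 f n rfl le_rfl (by omega) hn]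
      have hmin1 : 1 ≤ min n (K - 0) := by omega
      rw [ih (n - min n (K - 0)) _ (by omega) (by omega)]
      apply List.map_congr_left; intro i hi
      have hi' : 0 ≤ i ∧ i < K := by
        have := (PySem.List.mem_pyRange_one).mp hi; omega
      rw [PySem.Int.floordiv_eq_ediv_of_pos hK, PySem.Int.mod_eq_emod_of_pos hK,
          PySem.Int.floordiv_eq_ediv_of_pos hK, PySem.Int.mod_eq_emod_of_pos hK]
      by_cases hnK : K ≤ n
      · have hm : min n (K - 0) = K := by omega
        rw [hm]
        have hdiv : (n - K) / K = n / K - 1 := by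
          have := Int.add_mul_ediv_right (n - K) 1 (by omega : K ≠ 0)
          simp at this; omega
        have hmod : (n - K) % K = n % K := Int.sub_emod_right n K
        rw [hdiv, hmod]
        split_ifs <;> omega
      · have hm : min n (K - 0) = n := by omega
        rw [hm]
        simp only [sub_self]
        rw [Int.zero_ediv, Int.zero_emod, Int.ediv_eq_zero_of_lt (by omega) (by omega),
            Int.emod_eq_of_lt (by omega) (by omega)]
        split_ifs <;> omega
    · have hn0 : n = 0 := by omega
      subst hn0
      simp only [pvWhile, lt_irrefl, if_false]
      apply Eq.symm; apply List.map_congr_left; intro i _hi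
      rw [PySem.Int.floordiv_eq_ediv_of_pos hK, PySem.Int.mod_eq_emod_of_pos hK]
      simp
      have := (PySem.List.mem_pyRange_one).mp _hi; omega

-- ===== VERDICT (by name: the statement is the Claim_ definition above) =====
theorem getContiguousPartitions_spec : Claim_equal_getContiguousPartitions := by
  intro lines K _hDom hPre
  unfold Spec_getContiguousPartitions
  by_cases hK : 0 < K
  · have hb : divyUpNumber (lines.length : Int) K
        = (PySem.List.pyRange 0 K 1).map (fun i =>
            PySem.Int.floordiv (lines.length : Int) K +
              if i < PySem.Int.mod (lines.length : Int) K then 1 else 0) := by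
      unfold divyUpNumber
      rw [pv_while_rounds K hK (Int.toNat (lines.length : Int)) (lines.length : Int)
            (fun _ => (0 : Int)) (by omega) (le_refl _)]
      simp
    unfold getContiguousPartitions getContiguousPartitions_alt
    rw [hb, List.foldl_map]
  · have hl : lines = [] := by
      rcases hPre with h | h
      · exact absurd h hK
      · exact h
    subst hl
    have hr : PySem.List.pyRange 0 K 1 = [] := PySem.List.pyRange_one_eq_nil (by omega)
    simp [getContiguousPartitions, getContiguousPartitions_alt, divyUpNumber, pvWhile, hr]
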